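-- pv_equiv track=rewrite | github.com/YousifGad/Convex-Hull-Based-Real-Time-Object-Tracker-Using-Geometric-Shape-Analysis | graham_scan.py | get_pivot
-- ===== SOURCE A (Python) =====
-- def get_pivot(points):
--     points_y = [point[1] for point in points]
--     pivot_y = min(points_y)
--     z = []
--     for point in points:
--         if point[1] == pivot_y:
--             z.append(point[0])
--     pivot_x = min(z)
--     return (pivot_x, pivot_y)
-- ===== SOURCE B (Python) =====
-- def get_pivot(points):
--     best = min(points, key=lambda p: (p[1], p[0]))
--     return (best[0], best[1])
-- ===== Notes on version B (the rewrite author's own statement) =====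
-- stated objective: simpler
-- what changed: Replaces A's two-phase scan (collect all y's, take min-y, filter points at that y, take min of their x's) with a single keyed selection min(points, key=(y, x)).
import Mathlib
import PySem

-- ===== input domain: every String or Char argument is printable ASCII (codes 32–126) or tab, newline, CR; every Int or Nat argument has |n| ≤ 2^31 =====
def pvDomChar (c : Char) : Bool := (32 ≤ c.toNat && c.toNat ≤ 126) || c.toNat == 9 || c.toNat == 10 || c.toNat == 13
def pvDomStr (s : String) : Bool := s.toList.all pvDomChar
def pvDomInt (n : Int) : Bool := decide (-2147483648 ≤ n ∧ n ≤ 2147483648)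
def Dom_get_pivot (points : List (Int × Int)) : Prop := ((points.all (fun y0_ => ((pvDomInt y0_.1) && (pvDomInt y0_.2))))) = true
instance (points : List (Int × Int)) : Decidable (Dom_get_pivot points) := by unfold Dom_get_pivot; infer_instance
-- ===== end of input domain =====

-- B replaces A's two-phase min-y-then-min-x scan with one keyed selection min(points, key=(y, x)); objective: simpler.

-- ===== PORT A =====
def get_pivot (points : List (Int × Int)) : Int × Int :=
  let points_y := points.map (fun point => point.2)
  match PySem.List.min? points_y (fun y => y) with
  | none => (0, 0)      -- Python: ValueError; excluded by Pre_
  | some pivot_y =>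
    let z := points.foldl (fun acc point => if point.2 == pivot_y then acc ++ [point.1] else acc) ([] : List Int)
    match PySem.List.min? z (fun y => y) with
    | none => (0, 0)    -- unreachable when points ≠ []
    | some pivot_x => (pivot_x, pivot_y)

-- ===== PORT B =====
def get_pivot_alt (points : List (Int × Int)) : Int × Int :=
  match PySem.List.min2? points (fun p => p.2) (fun p => p.1) with
  | none => (0, 0)      -- Python: ValueError; excluded by Pre_
  | some best => (best.1, best.2)

-- ===== PRECONDITION & SPEC =====
-- Pre_ excludes exactly the empty list, on which Python's min raises ValueError (in both A and B).
def Pre_get_pivot (points : List (Int × Int)) : Prop := points ≠ []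
instance (points : List (Int × Int)) : Decidable (Pre_get_pivot points) := by unfold Pre_get_pivot; infer_instance
def pvWitness_get_pivot : (List (Int × Int)) := [(3, 2), (1, 2), (0, 5)]

def Spec_get_pivot (points : List (Int × Int)) (out : Int × Int) : Prop := out = get_pivot_alt points
instance (points : List (Int × Int)) (out : Int × Int) : Decidable (Spec_get_pivot points out) := by unfold Spec_get_pivot; infer_instance

-- ===== CLAIM (what is proved, stated in full; the proofs are below) =====
def Claim_equal_get_pivot : Prop := ∀ (points : List (Int × Int)), Dom_get_pivot points → Pre_get_pivot points → Spec_get_pivot points (get_pivot points)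

-- ===== LEMMAS AND PROOFS =====

-- one step of min2? keeps the lexicographic minimum of the first two elements
theorem min2_cons (p x : Int × Int) (t : List (Int × Int)) :
    PySem.List.min2? (p :: x :: t) (fun q => q.2) (fun q => q.1)
      = PySem.List.min2? ((if (decide (x.2 < p.2) || !decide (p.2 < x.2) && decide (x.1 < p.1)) = true then x else p) :: t) (fun q => q.2) (fun q => q.1) := by
  simp only [PySem.List.min2?, List.foldl_cons]
  split_ifs with h <;> simp

-- min2? on a nonempty list returns a member that is lexicographically ≤ every element
theorem min2_spec (t : List (Int × Int)) (p : Int × Int) :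
    ∃ r, PySem.List.min2? (p :: t) (fun q => q.2) (fun q => q.1) = some r ∧ r ∈ p :: t ∧
      ∀ y ∈ p :: t, r.2 ≤ y.2 ∧ (r.2 = y.2 → r.1 ≤ y.1) := by
  induction t generalizing p with
  | nil =>
    refine ⟨p, by simp [PySem.List.min2?], List.mem_cons_self .., ?_⟩
    intro y hy
    simp only [List.mem_singleton] at hy
    subst hy
    exact ⟨le_refl _, fun _ => le_refl _⟩
  | cons x t ih =>
    rw [min2_cons]
    by_cases hx : (decide (x.2 < p.2) || !decide (p.2 < x.2) && decide (x.1 < p.1)) = true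
    · obtain ⟨r, hval, hmem, hmin⟩ := ih x
      refine ⟨r, by rw [if_pos hx] at *; exact hval, List.mem_cons_of_mem p (by simpa [hx] using hmem), ?_⟩
      intro y hy
      rcases List.mem_cons.1 hy with rfl | hy'
      · -- y = p, beaten by x
        have hxs := hmin x (List.mem_cons_self ..)
        simp only [Bool.or_eq_true, Bool.and_eq_true, Bool.not_eq_true', decide_eq_true_eq,
          decide_eq_false_iff_not] at hx
        rcases hx with h1 | ⟨h2, h3⟩
        · exact ⟨by omega, fun he => absurd he (by omega)⟩
        · have hx2 : x.2 ≤ y.2 := not_lt.1 h2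
          refine ⟨by omega, fun he => ?_⟩
          have hrx : r.2 = x.2 := by omega
          have := hxs.2 hrx
          omega
      · exact hmin y hy'
    · obtain ⟨r, hval, hmem, hmin⟩ := ih p
      refine ⟨r, by rw [if_neg hx] at *; exact hval, ?_, ?_⟩
      · rcases List.mem_cons.1 hmem with h | h
        · exact h ▸ List.mem_cons_self ..
        · exact List.mem_cons_of_mem p (List.mem_cons_of_mem x h)
      · intro y hy
        have hrp := hmin p (List.mem_cons_self ..)
        rcases List.mem_cons.1 hy with rfl | hy'
        · exact hrp
        · rcases List.mem_cons.1 hy' with rfl | hy''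
          · -- y = x, not better than p
            simp only [Bool.or_eq_true, Bool.and_eq_true, Bool.not_eq_true', decide_eq_true_eq,
              decide_eq_false_iff_not, not_or, not_and] at hx
            obtain ⟨h1, h2⟩ := hx
            have hp2 : p.2 ≤ y.2 := not_lt.1 h1
            refine ⟨by omega, fun he => ?_⟩
            have hpeq : r.2 = p.2 := by omega
            have hr1 := hrp.2 hpeq
            have h3 : ¬ y.1 < p.1 := h2 (by omega)
            omega
          · exact hmin y (List.mem_cons_of_mem p hy'')

-- ===== VERDICT (by name: the statement is the Claim_ definition above) =====
theorem get_pivot_spec : Claim_equal_get_pivot := by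
  intro points _ hpre
  unfold Spec_get_pivot
  cases points with
  | nil => exact absurd rfl hpre
  | cons p t =>
    -- B side
    obtain ⟨r, hval, hrmem, hmin⟩ := min2_spec t p
    have hralt : get_pivot_alt (p :: t) = (r.1, r.2) := by
      simp only [get_pivot_alt, hval]
    -- A side
    have hy_ne : (p :: t).map (fun point => point.2) ≠ [] := by simp
    obtain ⟨pivot_y, hpy⟩ : ∃ y, PySem.List.min? ((p :: t).map (fun point => point.2)) (fun y => y) = some y := by
      cases hmy : PySem.List.min? ((p :: t).map (fun point => point.2)) (fun y => y) with
      | none => exact absurd ((PySem.List.min?_eq_none_iff _ _).mp hmy) hy_ne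
      | some y => exact ⟨y, rfl⟩
    have hpy_mem := PySem.List.min?_mem hpy
    have hpy_min := PySem.List.min?_isMin hpy
    obtain ⟨q, hq_mem, hq2⟩ : ∃ q ∈ p :: t, q.2 = pivot_y := by
      obtain ⟨q, hq, hq2⟩ := List.mem_map.1 hpy_mem
      exact ⟨q, hq, hq2⟩
    have hz : (p :: t).foldl (fun acc point => if point.2 == pivot_y then acc ++ [point.1] else acc) ([] : List Int)
        = ((p :: t).filter (fun point => point.2 == pivot_y)).map (fun point => point.1) := by
      simpa using PySem.List.foldl_append_if (p := fun point => point.2 == pivot_y)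
        (f := fun point => point.1) (l := p :: t) (acc := [])
    have hq_filt : q ∈ (p :: t).filter (fun point => point.2 == pivot_y) :=
      List.mem_filter.2 ⟨hq_mem, by simp [hq2]⟩
    have hz_ne : ((p :: t).filter (fun point => point.2 == pivot_y)).map (fun point => point.1) ≠ [] := by
      intro hc
      have : q.1 ∈ ((p :: t).filter (fun point => point.2 == pivot_y)).map (fun point => point.1) :=
        List.mem_map.2 ⟨q, hq_filt, rfl⟩
      rw [hc] at this
      exact absurd this (List.not_mem_nil)
    obtain ⟨pivot_x, hpx⟩ : ∃ x, PySem.List.min? (((p :: t).filter (fun point => point.2 == pivot_y)).map (fun point => point.1)) (fun y => y) = some x := by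
      cases hmx : PySem.List.min? (((p :: t).filter (fun point => point.2 == pivot_y)).map (fun point => point.1)) (fun y => y) with
      | none => exact absurd ((PySem.List.min?_eq_none_iff _ _).mp hmx) hz_ne
      | some x => exact ⟨x, rfl⟩
    have hpx_mem := PySem.List.min?_mem hpx
    have hpx_min := PySem.List.min?_isMin hpx
    have hA : get_pivot (p :: t) = (pivot_x, pivot_y) := by
      simp only [get_pivot, hpy, hz, hpx]
    -- the two minima coincide
    have hr2 : r.2 = pivot_y := by
      have h1 : pivot_y ≤ r.2 := hpy_min r.2 (List.mem_map.2 ⟨r, hrmem, rfl⟩)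
      have h2 : r.2 ≤ q.2 := (hmin q hq_mem).1
      omega
    have hr1 : r.1 = pivot_x := by
      have h1 : pivot_x ≤ r.1 := hpx_min r.1 (List.mem_map.2 ⟨r,
        List.mem_filter.2 ⟨hrmem, by simp [hr2]⟩, rfl⟩)
      obtain ⟨s, hs, hs1⟩ := List.mem_map.1 hpx_mem
      obtain ⟨hs_mem, hs2⟩ := List.mem_filter.1 hs
      have hs2' : s.2 = pivot_y := by simpa using hs2
      have h2 : r.1 ≤ s.1 := (hmin s hs_mem).2 (by omega)
      omega
    rw [hA, hralt, hr1, hr2]
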